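-- pv_equiv track=rewrite | github.com/qkr323/analytical-command-center | portfolio-tracker/backend/services/parsers/futu.py | _join_wrapped_lines
-- ===== SOURCE A (Python) =====
-- def _join_wrapped_lines(lines: list[str]) -> list[str]:
--     """Join lines where a symbol name was wrapped (unclosed parenthesis)."""
--     result: list[str] = []
--     i = 0
--     while i < len(lines):
--         line = lines[i]
--         if line.count("(") > line.count(")") and i + 1 < len(lines):
--             line = line.rstrip() + " " + lines[i + 1].strip()
--             i += 2
--         else:
--             i += 1
--         result.append(line)
--     return result
-- ===== SOURCE B (Python) =====
-- def _join_wrapped_lines(lines: list[str]) -> list[str]: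
--     """Join lines where a symbol name was wrapped (unclosed parenthesis)."""
--     result: list[str] = []
--     pending = None  # an unclosed-paren line waiting for its continuation
--     for line in lines:
--         if pending is not None:
--             result.append(pending.rstrip() + " " + line.strip())
--             pending = None
--         elif line.count("(") > line.count(")"):
--             pending = line
--         else:
--             result.append(line)
--     if pending is not None:
--         result.append(pending)
--     return result
-- ===== Notes on version B (the rewrite author's own statement) =====
-- stated objective: alternative
-- what changed: Replaces A's index-managed while loop that consumes two lines at once (i += 2 and a lines[i+1] lookup with its bounds check) by a one-element-at-a-time state machine: a single fold over the lines carrying a 'pending' unclosed line in the accumulator, emitting the join when the next element arrives and flushing the leftover pending line after the loop.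
import Mathlib
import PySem

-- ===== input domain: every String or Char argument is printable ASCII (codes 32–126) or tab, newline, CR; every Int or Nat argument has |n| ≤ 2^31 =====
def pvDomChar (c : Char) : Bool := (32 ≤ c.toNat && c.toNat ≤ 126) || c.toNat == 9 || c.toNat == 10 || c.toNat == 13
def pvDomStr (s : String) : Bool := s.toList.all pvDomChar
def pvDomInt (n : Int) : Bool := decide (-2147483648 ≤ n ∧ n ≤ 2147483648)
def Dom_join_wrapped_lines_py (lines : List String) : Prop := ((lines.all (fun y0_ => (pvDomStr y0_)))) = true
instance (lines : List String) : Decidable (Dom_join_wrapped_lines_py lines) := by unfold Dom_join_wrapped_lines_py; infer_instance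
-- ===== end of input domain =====

-- B replaces A's two-at-a-time index loop by a single fold carrying a 'pending' unclosed line, flushed after the loop (alternative decomposition); same return values.


-- ===== PORT A =====
-- while-loop over an index i, stepping by 1 or 2; result accumulated in order
def joinWrappedLoopA (lines : List String) (i : Nat) (result : List String) : List String :=
  if h : i < lines.length then
    let line := lines[i]
    if h2 : PySem.Str.count line "(" > PySem.Str.count line ")" ∧ i + 1 < lines.length then
      joinWrappedLoopA lines (i + 2)
        (result ++ [PySem.Str.rstrip line ++ " " ++ PySem.Str.strip (lines[i + 1]'h2.2)])
    else
      joinWrappedLoopA lines (i + 1) (result ++ [line])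
  else
    result
termination_by lines.length - i
decreasing_by all_goals omega

def join_wrapped_lines_py (lines : List String) : List String :=
  joinWrappedLoopA lines 0 []

-- ===== PORT B =====
-- state machine: fold over the lines carrying (result, pending unclosed line); flush pending at the end
def joinWrappedStepB (acc : List String × Option String) (line : String) : List String × Option String :=
  match acc.2 with
  | some p => (acc.1 ++ [PySem.Str.rstrip p ++ " " ++ PySem.Str.strip line], none)
  | none =>
    if PySem.Str.count line "(" > PySem.Str.count line ")" then (acc.1, some line)
    else (acc.1 ++ [line], none)

def join_wrapped_lines_py_alt (lines : List String) : List String :=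
  let st := lines.foldl joinWrappedStepB ([], none)
  match st.2 with
  | some p => st.1 ++ [p]
  | none => st.1

-- ===== PRECONDITION & SPEC =====
def Spec_join_wrapped_lines_py (lines : List String) (out : List String) : Prop := out = join_wrapped_lines_py_alt lines
instance (lines : List String) (out : List String) : Decidable (Spec_join_wrapped_lines_py lines out) := by unfold Spec_join_wrapped_lines_py; infer_instance

-- ===== CLAIM (what is proved, stated in full; the proofs are below) =====
def Claim_equal_join_wrapped_lines_py : Prop := ∀ (lines : List String), Dom_join_wrapped_lines_py lines → Spec_join_wrapped_lines_py lines (join_wrapped_lines_py lines)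

-- ===== LEMMAS AND PROOFS =====
-- finalize B's fold state
def joinWrappedFinB (st : List String × Option String) : List String :=
  match st.2 with
  | some p => st.1 ++ [p]
  | none => st.1

lemma joinWrappedLoopA_eq (n : Nat) : ∀ (lines : List String) (i : Nat) (res : List String),
    lines.length - i = n →
    joinWrappedLoopA lines i res = joinWrappedFinB ((lines.drop i).foldl joinWrappedStepB (res, none)) := by
  induction n using Nat.strong_induction_on with
  | _ n ih =>
    intro lines i res hn
    unfold joinWrappedLoopA
    by_cases h : i < lines.length
    · have hdrop : lines.drop i = lines[i] :: lines.drop (i + 1) :=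
        (List.drop_eq_getElem_cons h).symm ▸ rfl
      simp only [h, dif_pos]
      by_cases hc : PySem.Str.count lines[i] "(" > PySem.Str.count lines[i] ")"
      · by_cases h2 : i + 1 < lines.length
        · have hdrop2 : lines.drop (i + 1) = lines[i + 1] :: lines.drop (i + 2) :=
            (List.drop_eq_getElem_cons h2).symm ▸ rfl
          rw [dif_pos ⟨hc, h2⟩, ih (lines.length - (i + 2)) (by omega) lines (i + 2) _ rfl,
            hdrop, hdrop2]
          simp only [List.foldl_cons, joinWrappedStepB, if_pos hc]
        · rw [dif_neg (by tauto), ih (lines.length - (i + 1)) (by omega) lines (i + 1) _ rfl,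
            hdrop]
          have hnil : lines.drop (i + 1) = [] := List.drop_eq_nil_of_le (by omega)
          rw [hnil]
          simp only [List.foldl_cons, List.foldl_nil, joinWrappedStepB, if_pos hc, joinWrappedFinB]
      · rw [dif_neg (by tauto), ih (lines.length - (i + 1)) (by omega) lines (i + 1) _ rfl,
          hdrop]
        simp only [List.foldl_cons, joinWrappedStepB, if_neg hc]
    · have : lines.drop i = [] := List.drop_eq_nil_of_le (by omega)
      rw [this]
      simp [h, joinWrappedFinB]

-- ===== VERDICT (by name: the statement is the Claim_ definition above) =====
theorem join_wrapped_lines_py_spec : Claim_equal_join_wrapped_lines_py := by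
  intro lines _
  unfold Spec_join_wrapped_lines_py join_wrapped_lines_py join_wrapped_lines_py_alt
  rw [joinWrappedLoopA_eq (lines.length - 0) lines 0 [] rfl]
  simp [joinWrappedFinB]
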